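-- pv_equiv track=rewrite | github.com/pistachioL/AlphaVault | alphavault/ui/thread_tree_parse.py | _is_escaped
-- ===== SOURCE A (Python) =====
-- def _is_escaped(text: str, idx: int) -> bool:
--     if idx <= 0 or idx >= len(text):
--         return False
--     backslashes = 0
--     i = idx - 1
--     while i >= 0 and text[i] == "\\":
--         backslashes += 1
--         i -= 1
--     return (backslashes % 2) == 1
-- ===== SOURCE B (Python) =====
-- def _is_escaped(text: str, idx: int) -> bool:
--     if idx <= 0 or idx >= len(text):
--         return False
--     # Forward scanner: a one-bit escape-state automaton over the prefix.
--     # After reading each char, esc is True iff that char position is the start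
--     # of an active escape for the NEXT char: a backslash toggles the state,
--     # anything else resets it. The state after text[:idx] says whether text[idx]
--     # is escaped.
--     esc = False
--     for ch in text[:idx]:
--         esc = (not esc) if ch == "\\" else False
--     return esc
-- ===== Notes on version B (the rewrite author's own statement) =====
-- stated objective: alternative
-- what changed: Replaces A's backward run-counting loop (scan left from idx-1 counting consecutive backslashes, then take the parity) with a forward one-bit escape-state automaton: a single left-to-right pass over text[:idx] whose boolean state is toggled by a backslash and reset by any other char; the final state is the answer.
import Mathlib
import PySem

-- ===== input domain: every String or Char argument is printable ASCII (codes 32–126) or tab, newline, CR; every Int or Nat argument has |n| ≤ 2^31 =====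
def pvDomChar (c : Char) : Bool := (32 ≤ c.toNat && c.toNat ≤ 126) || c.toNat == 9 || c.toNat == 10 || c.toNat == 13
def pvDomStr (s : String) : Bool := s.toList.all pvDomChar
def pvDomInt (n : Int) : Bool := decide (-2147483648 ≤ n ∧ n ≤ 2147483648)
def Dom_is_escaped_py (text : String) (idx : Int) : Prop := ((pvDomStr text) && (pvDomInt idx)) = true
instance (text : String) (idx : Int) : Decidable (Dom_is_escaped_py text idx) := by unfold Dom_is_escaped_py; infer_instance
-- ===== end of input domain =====

-- B replaces A's backward run-counting loop by a forward one-bit escape-state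
-- automaton over the prefix text[:idx] (alternative decomposition, same cost).

-- ===== PORT A =====
-- the while loop 'while i >= 0 and text[i] == "\\"': state j encodes i+1 (j = 0 means i = -1)
def escLoopA (cs : List Char) : Nat → Int → Int
  | 0, acc => acc
  | j+1, acc =>
    if PySem.List.pyGet? cs (j : Int) = some '\\' then escLoopA cs j (acc + 1) else acc

def is_escaped_py (text : String) (idx : Int) : Bool :=
  if idx ≤ 0 ∨ idx ≥ PySem.Str.len text then false
  else
    -- i starts at idx - 1, i.e. state j = idx
    decide (escLoopA text.toList idx.toNat 0 % 2 = 1)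

-- ===== PORT B =====
def is_escaped_py_alt (text : String) (idx : Int) : Bool :=
  if idx ≤ 0 ∨ idx ≥ PySem.Str.len text then false
  else
    -- 'for ch in text[:idx]: esc = (not esc) if ch == "\\" else False'
    (PySem.List.slice text.toList none (some idx)).foldl
      (fun esc ch => if ch == '\\' then !esc else false) false

-- ===== PRECONDITION & SPEC =====
def Spec_is_escaped_py (text : String) (idx : Int) (out : Bool) : Prop := out = is_escaped_py_alt text idx
instance (text : String) (idx : Int) (out : Bool) : Decidable (Spec_is_escaped_py text idx out) := by unfold Spec_is_escaped_py; infer_instance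

-- ===== CLAIM (what is proved, stated in full; the proofs are below) =====
def Claim_equal_is_escaped_py : Prop := ∀ (text : String) (idx : Int), Dom_is_escaped_py text idx → Spec_is_escaped_py text idx (is_escaped_py text idx)

-- ===== LEMMAS AND PROOFS =====

-- A's loop counts the trailing backslashes of the prefix take j
theorem escLoopA_eq (cs : List Char) : ∀ (j : Nat) (acc : Int), j ≤ cs.length →
    escLoopA cs j acc = acc + (((cs.take j).reverse.takeWhile (fun c => c == '\\')).length : Int) := by
  intro j
  induction j with
  | zero => intro acc _; simp [escLoopA]
  | succ j ih =>
    intro acc hj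
    have hjlt : j < cs.length := by omega
    have hget : PySem.List.pyGet? cs (j : Int) = some cs[j] := by
      simp [PySem.List.pyGet?, PySem.List.pyIdx?, hjlt]
    have htake : (cs.take (j+1)).reverse = cs[j] :: (cs.take j).reverse := by
      rw [List.take_add_one]
      simp [hjlt]
    by_cases hc : cs[j] = '\\'
    · have hb : (cs[j] == '\\') = true := by simp [hc]
      simp only [escLoopA, hget, hc]
      rw [ih (acc + 1) (by omega), htake]
      simp [List.takeWhile, hb]
      ring
    · have hb : (cs[j] == '\\') = false := by simp [hc]
      simp only [escLoopA, hget]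
      rw [if_neg (by simp [hc]), htake]
      simp [List.takeWhile, hb]

-- B's automaton computes the parity of the trailing backslash run
theorem foldl_esc_eq (l : List Char) :
    l.foldl (fun esc ch => if ch == '\\' then !esc else false) false
      = decide ((l.reverse.takeWhile (fun c => c == '\\')).length % 2 = 1) := by
  induction l using List.reverseRecOn with
  | nil => simp
  | append_singleton l c ih =>
    rw [List.foldl_append, List.foldl_cons, List.foldl_nil, ih]
    by_cases hc : c = '\\'
    · have hb : (c == '\\') = true := by simp [hc]
      simp only [List.reverse_append, List.reverse_singleton, List.singleton_append,
        List.takeWhile, hb, List.length_cons]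
      set m := (l.reverse.takeWhile (fun c => c == '\\')).length
      rcases Nat.even_or_odd m with h | h
      · rw [Nat.even_iff] at h
        rw [decide_eq_false (by omega), decide_eq_true (by omega)]
        rfl
      · rw [Nat.odd_iff] at h
        rw [decide_eq_true h, decide_eq_false (by omega)]
        rfl
    · have hb : (c == '\\') = false := by simp [hc]
      simp [List.takeWhile, hb]

-- ===== VERDICT (by name: the statement is the Claim_ definition above) =====
theorem is_escaped_py_spec : Claim_equal_is_escaped_py := by
  intro text idx _
  unfold Spec_is_escaped_py is_escaped_py is_escaped_py_alt
  by_cases hguard : idx ≤ 0 ∨ idx ≥ PySem.Str.len text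
  · rw [if_pos hguard, if_pos hguard]
  · rw [if_neg hguard, if_neg hguard]
    rw [not_or] at hguard
    obtain ⟨h0, hlen⟩ := hguard
    rw [not_le] at h0
    rw [ge_iff_le, not_le] at hlen
    have hlen' : idx < (text.toList.length : Int) := by
      simpa [PySem.Str.len_eq] using hlen
    have hp : PySem.List.slice text.toList none (some idx) = text.toList.take idx.toNat :=
      PySem.List.slice_to _ (by omega)
    set cs := text.toList with hcs
    have hjle : idx.toNat ≤ cs.length := by omega
    rw [hp, foldl_esc_eq, escLoopA_eq cs idx.toNat 0 hjle]
    set m := ((cs.take idx.toNat).reverse.takeWhile (fun c => c == '\\')).length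
    rw [decide_eq_decide]
    omega
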